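-- pv_equiv track=rewrite | github.com/Bhooyas/Houise | Play.py | claim
-- ===== SOURCE A (Python) =====
-- def claim(tickect,prise,remaing_numbers):
--     if prise in [0,1]:
--         for row in tickect:
--             for i in row:
--                 if i in remaing_numbers:
--                     return False
--         return True
--     elif prise == 2:
--         not_num = 0
--         for row in tickect:
--             for i in row:
--                 if i not in remaing_numbers and i!=0:
--                     not_num += 1
--         if not_num >= 5:
--             return True
--         else:
--             return False
--     elif prise == 3:
--         row = tickect[0]
--         for i in row:
--             if i in remaing_numbers:
--                 return False
--         return True
--     elif prise == 4:
--         row = tickect[1]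
--         for i in row:
--             if i in remaing_numbers:
--                 return False
--         return True
--     elif prise ==  5:
--         row = tickect[2]
--         for i in row:
--             if i in remaing_numbers:
--                 return False
--         return True
--     elif prise == 6:
--         for row in tickect:
--             for i in row:
--                 if i <=50:
--                     if i in remaing_numbers:
--                         return False
--         return True
--     elif prise == 7:
--         for row in tickect:
--             for i in row:
--                 if i>=50:
--                     if i in remaing_numbers:
--                         return False
--         return True
--     else:
--         return False
-- ===== SOURCE B (Python) =====
-- def claim(tickect, prise, remaing_numbers):
--     # One uniform pass over the ticket computing every statistic any prize could
--     # need, then a table dispatch on the prize type (A instead dispatches first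
--     # and runs a prize-specific scan with early returns).
--     row_ok = []            # per row: every cell marked?
--     all_ok = True          # every cell of the ticket marked?
--     low_ok = True          # every cell <= 50 marked?
--     high_ok = True         # every cell >= 50 marked?
--     marked_nonzero = 0     # marked cells that are not the blank 0
--     for row in tickect:
--         ok = True
--         for i in row:
--             if i in remaing_numbers:
--                 ok = False
--                 all_ok = False
--                 if i <= 50:
--                     low_ok = False
--                 if i >= 50:
--                     high_ok = False
--             elif i != 0:
--                 marked_nonzero += 1
--         row_ok.append(ok)
--     table = {0: all_ok, 1: all_ok, 2: marked_nonzero >= 5, 6: low_ok, 7: high_ok}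
--     if prise in table:
--         return table[prise]
--     if prise in (3, 4, 5):
--         return row_ok[prise - 3]
--     return False
-- ===== Notes on version B (the rewrite author's own statement) =====
-- stated objective: alternative
-- what changed: A dispatches on prize type first and runs a prize-specific nested scan with early returns; B makes one uniform pass over all cells accumulating every statistic at once (per-row ok flags, global/low/high all-marked flags, nonzero-marked count) and then answers by a table lookup on the prize.
import Mathlib
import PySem

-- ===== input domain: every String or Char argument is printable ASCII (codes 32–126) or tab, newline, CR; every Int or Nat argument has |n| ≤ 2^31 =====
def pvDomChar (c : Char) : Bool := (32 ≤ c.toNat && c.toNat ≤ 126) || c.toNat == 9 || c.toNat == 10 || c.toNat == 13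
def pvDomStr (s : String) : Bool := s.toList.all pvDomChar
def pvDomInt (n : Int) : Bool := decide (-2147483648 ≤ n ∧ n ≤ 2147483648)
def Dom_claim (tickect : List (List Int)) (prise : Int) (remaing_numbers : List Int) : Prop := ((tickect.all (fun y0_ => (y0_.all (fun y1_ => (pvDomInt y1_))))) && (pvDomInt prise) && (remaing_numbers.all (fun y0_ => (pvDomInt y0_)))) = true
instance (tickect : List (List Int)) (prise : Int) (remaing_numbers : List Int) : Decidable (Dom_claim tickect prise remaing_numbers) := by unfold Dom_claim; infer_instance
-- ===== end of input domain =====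

-- B replaces A's dispatch-then-scan (seven prize-specific early-return loops) by ONE uniform
-- pass accumulating all statistics any prize could need, then a table lookup; same behaviour.

-- ===== PORT A =====
def claim (tickect : List (List Int)) (prise : Int) (remaing_numbers : List Int) : Bool :=
  if prise = 0 ∨ prise = 1 then
    tickect.all (fun row => row.all (fun i => !remaing_numbers.contains i))
  else if prise = 2 then
    -- not_num, inlined
    if tickect.foldl (fun acc row =>
        row.foldl (fun acc i =>
          if !remaing_numbers.contains i && i != 0 then acc + 1 else acc) acc) 0 ≥ (5:Int)
    then true else false
  else if prise = 3 then
    match PySem.List.pyGet? tickect 0 with        -- tickect[0]; none = IndexError, outside Pre_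
    | some row => row.all (fun i => !remaing_numbers.contains i)
    | none => false
  else if prise = 4 then
    match PySem.List.pyGet? tickect 1 with
    | some row => row.all (fun i => !remaing_numbers.contains i)
    | none => false
  else if prise = 5 then
    match PySem.List.pyGet? tickect 2 with
    | some row => row.all (fun i => !remaing_numbers.contains i)
    | none => false
  else if prise = 6 then
    tickect.all (fun row => row.all (fun i => if i ≤ 50 then !remaing_numbers.contains i else true))
  else if prise = 7 then
    tickect.all (fun row => row.all (fun i => if i ≥ 50 then !remaing_numbers.contains i else true))
  else false

-- ===== PORT B =====
-- State (ok, all_ok, low_ok, high_ok, marked_nonzero) updated per cell, exactly Source B's inner loop body.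
def cellStep (rem : List Int) (s : Bool × Bool × Bool × Bool × Int) (i : Int) :
    Bool × Bool × Bool × Bool × Int :=
  if rem.contains i then
    (false, false,
     if i ≤ 50 then false else s.2.2.1,
     if i ≥ 50 then false else s.2.2.2.1,
     s.2.2.2.2)
  else if i != 0 then (s.1, s.2.1, s.2.2.1, s.2.2.2.1, s.2.2.2.2 + 1)
  else s

-- outer loop body: reset ok to True, scan the row, append ok to row_ok
def rowStep (rem : List Int) (s : List Bool × Bool × Bool × Bool × Int) (row : List Int) :
    List Bool × Bool × Bool × Bool × Int :=
  let r := row.foldl (cellStep rem) (true, s.2.1, s.2.2.1, s.2.2.2.1, s.2.2.2.2)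
  (s.1 ++ [r.1], r.2.1, r.2.2.1, r.2.2.2.1, r.2.2.2.2)

def claim_alt (tickect : List (List Int)) (prise : Int) (remaing_numbers : List Int) : Bool :=
  let st := tickect.foldl (rowStep remaing_numbers) ([], true, true, true, (0:Int))
  if prise = 0 ∨ prise = 1 then st.2.1
  else if prise = 2 then decide (st.2.2.2.2 ≥ 5)
  else if prise = 6 then st.2.2.1
  else if prise = 7 then st.2.2.2.1
  else if prise = 3 ∨ prise = 4 ∨ prise = 5 then
    match PySem.List.pyGet? st.1 (prise - 3) with  -- row_ok[prise-3]; none = IndexError, outside Pre_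
    | some b => b
    | none => false
  else false

-- ===== PRECONDITION & SPEC =====
-- Pre_ excludes exactly the inputs where both Pythons raise IndexError: prise 3/4/5 with a
-- ticket that lacks the indexed row.
def Pre_claim (tickect : List (List Int)) (prise : Int) (remaing_numbers : List Int) : Prop :=
  (prise = 3 → 1 ≤ tickect.length) ∧ (prise = 4 → 2 ≤ tickect.length) ∧ (prise = 5 → 3 ≤ tickect.length)
instance (tickect : List (List Int)) (prise : Int) (remaing_numbers : List Int) : Decidable (Pre_claim tickect prise remaing_numbers) := by unfold Pre_claim; infer_instance

def pvWitness_claim : List (List Int) × Int × List Int := ([[1, 2], [0, 3], [4, 5]], 2, [2, 3])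

def Spec_claim (tickect : List (List Int)) (prise : Int) (remaing_numbers : List Int) (out : Bool) : Prop := out = claim_alt tickect prise remaing_numbers
instance (tickect : List (List Int)) (prise : Int) (remaing_numbers : List Int) (out : Bool) : Decidable (Spec_claim tickect prise remaing_numbers out) := by unfold Spec_claim; infer_instance

-- ===== CLAIM =====
def Claim_equal_claim : Prop := ∀ (tickect : List (List Int)) (prise : Int) (remaing_numbers : List Int), Dom_claim tickect prise remaing_numbers → Pre_claim tickect prise remaing_numbers → Spec_claim tickect prise remaing_numbers (claim tickect prise remaing_numbers)

-- ===== LEMMAS AND PROOFS =====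

-- characterisation of the inner (per-row) fold of B
theorem cell_fold_char (rem : List Int) (row : List Int) (ok a l h : Bool) (c : Int) :
    row.foldl (cellStep rem) (ok, a, l, h, c) =
      (ok && row.all (fun i => !rem.contains i),
       a && row.all (fun i => !rem.contains i),
       l && row.all (fun i => !decide (i ≤ 50) || !rem.contains i),
       h && row.all (fun i => !decide (i ≥ 50) || !rem.contains i),
       c + ((row.filter (fun i => !rem.contains i && i != 0)).length : Int)) := by
  induction row generalizing ok a l h c with
  | nil => simp
  | cons x row ih =>
    rw [List.foldl_cons]
    by_cases hx : x ∈ rem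
    · by_cases h50 : x ≤ 50 <;> by_cases h50' : (50:Int) ≤ x <;>
        simp [cellStep, hx, h50, h50', ih]
    · by_cases h0 : x = 0
      · subst h0; simp [cellStep, hx, ih]
      · simp [cellStep, hx, h0, ih]
        push_cast; ring

-- characterisation of the outer fold of B
theorem row_fold_char (rem : List Int) (t : List (List Int)) (L : List Bool) (a l h : Bool) (c : Int) :
    t.foldl (rowStep rem) (L, a, l, h, c) =
      (L ++ t.map (fun row => row.all (fun i => !rem.contains i)),
       a && t.flatten.all (fun i => !rem.contains i),
       l && t.flatten.all (fun i => !decide (i ≤ 50) || !rem.contains i),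
       h && t.flatten.all (fun i => !decide (i ≥ 50) || !rem.contains i),
       c + ((t.flatten.filter (fun i => !rem.contains i && i != 0)).length : Int)) := by
  induction t generalizing L a l h c with
  | nil => simp
  | cons r t ih =>
    rw [List.foldl_cons]
    show t.foldl (rowStep rem) (rowStep rem (L, a, l, h, c) r) = _
    rw [rowStep, cell_fold_char]
    simp only [ih]
    simp [List.filter_append, List.all_append, Bool.and_assoc]
    ring

-- A's counting foldl over one row equals the length of the filtered row, shifted by the accumulator.
theorem foldl_count_row (c : Int → Bool) (l : List Int) (n : Int) :
    l.foldl (fun acc i => if c i then acc + 1 else acc) n = n + ((l.filter c).length : Int) := by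
  induction l generalizing n with
  | nil => simp
  | cons x l ih => by_cases h : c x <;> simp [h, ih] <;> omega

-- A's nested counting foldl equals the length of the filtered flattened ticket.
theorem foldl_count_ticket (c : Int → Bool) (t : List (List Int)) (n : Int) :
    t.foldl (fun acc row => row.foldl (fun acc i => if c i then acc + 1 else acc) acc) n
      = n + ((t.flatten.filter c).length : Int) := by
  induction t generalizing n with
  | nil => simp
  | cons r t ih =>
    rw [List.foldl_cons, foldl_count_row, ih]
    simp [List.filter_append]
    push_cast
    ring

-- ===== VERDICT =====
theorem claim_spec : Claim_equal_claim := by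
  intro t p rem _ hpre
  unfold Spec_claim claim_alt
  rw [row_fold_char]
  by_cases h01 : p = 0 ∨ p = 1
  · rcases h01 with h | h <;> (subst h; simp [claim, List.all_flatten])
  · by_cases h2 : p = 2
    · subst h2
      norm_num [claim]
      have h : ∀ i : Int, (i ∉ rem ∧ ¬i = 0) ↔ ((!decide (i ∈ rem) && i != 0) = true) := by simp
      simp only [h]
      rw [foldl_count_ticket]
      simp
    · by_cases h6 : p = 6
      · subst h6
        norm_num [claim, List.all_flatten]
      · by_cases h7 : p = 7
        · subst h7
          norm_num [claim, List.all_flatten]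
        · by_cases h3 : p = 3
          · subst h3
            obtain ⟨hl, -, -⟩ := hpre
            cases t with
            | nil => exact absurd (hl rfl) (by simp)
            | cons r t' =>
              norm_num [claim, PySem.List.pyGet?_zero_cons]
          · by_cases h4 : p = 4
            · subst h4
              obtain ⟨-, hl, -⟩ := hpre
              have hlen := hl rfl
              match t, hlen with
              | r0 :: r1 :: t', _ =>
                norm_num [claim, PySem.List.pyGet?, PySem.List.pyIdx?]
            · by_cases h5 : p = 5
              · subst h5
                obtain ⟨-, -, hl⟩ := hpre
                have hlen := hl rfl
                match t, hlen with
                | r0 :: r1 :: r2 :: t', _ =>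
                  norm_num [claim, PySem.List.pyGet?, PySem.List.pyIdx?]
                  have hc : (2:Int) ≤ ↑t'.length + 1 + 1 := by omega
                  simp [hc]
              · simp [claim, h01, h2, h3, h4, h5, h6, h7]
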